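-- pv_equiv track=rewrite | github.com/aadil-sengupta/ParkingLocator | parseMeterCsv.py | parse_days
-- ===== SOURCE A (Python) =====
-- from typing import Optional, List
--
-- DAY_ORDER = ["Mo", "Tu", "We", "Th", "Fr", "Sa", "Su"]
--
-- def parse_days(s: Optional[str]) -> List[str]:
--     """Return normalized two-letter day abbreviations in canonical order."""
--     if not s or str(s).strip().lower() in {"nan", "none"}:
--         return []
--     parts = [p.strip() for p in str(s).split(",") if p.strip()]
--     parts = [p[:2].title() for p in parts]  # normalize case/length
--     # Keep only valid abbreviations and preserve DAY_ORDER ordering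
--     uniq = []
--     for d in DAY_ORDER:
--         if d in parts:
--             uniq.append(d)
--     return uniq
-- ===== SOURCE B (Python) =====
-- from typing import Optional, List
--
-- DAY_ORDER = ["Mo", "Tu", "We", "Th", "Fr", "Sa", "Su"]
--
-- def parse_days(s: Optional[str]) -> List[str]:
--     """Return normalized two-letter day abbreviations in canonical order."""
--     if not s or str(s).strip().lower() in {"nan", "none"}:
--         return []
--     idx = {day: i for i, day in enumerate(DAY_ORDER)}
--     seen = set()
--     for p in str(s).split(","):
--         tok = p.strip()[:2].title()
--         if tok in idx:
--             seen.add(idx[tok])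
--     return [DAY_ORDER[i] for i in sorted(seen)]
-- ===== Notes on version B (the rewrite author's own statement) =====
-- stated objective: idiomatic
-- what changed: Instead of scanning the canonical DAY_ORDER list and testing membership of each day in the token list, B builds a day-to-index map once, collects the indices of the input tokens in a set, and sorts the indices back into canonical order.
import Mathlib
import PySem

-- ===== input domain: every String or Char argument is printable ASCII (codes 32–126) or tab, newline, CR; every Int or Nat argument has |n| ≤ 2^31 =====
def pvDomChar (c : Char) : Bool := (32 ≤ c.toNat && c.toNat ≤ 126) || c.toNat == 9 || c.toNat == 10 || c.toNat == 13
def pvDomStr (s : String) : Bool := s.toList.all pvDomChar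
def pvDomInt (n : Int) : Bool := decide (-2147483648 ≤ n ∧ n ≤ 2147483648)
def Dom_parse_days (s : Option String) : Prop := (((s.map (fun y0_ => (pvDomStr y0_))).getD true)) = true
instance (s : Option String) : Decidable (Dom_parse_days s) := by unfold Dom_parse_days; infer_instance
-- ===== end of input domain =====

-- B: instead of scanning DAY_ORDER and testing membership in the token list, B sends each input
-- token through a day→position map into a set of indices and sorts them (objective: idiomatic).

-- hand port of str.title (exact on the ASCII domain: a letter not following a letter is uppercased,
-- a letter following a letter is lowercased, any other character passes through and ends the word)
def titleAux : List Char → Bool → List Char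
  | [], _ => []
  | c :: rest, prevAlpha =>
    (if PySem.Chars.isalpha c then
        (if prevAlpha then PySem.Chars.lowerChar c else PySem.Chars.upperChar c)
      else c) :: titleAux rest (PySem.Chars.isalpha c)

-- p[:2].title()  (a slice with literal nonnegative bounds 0:2 is List.take 2)
def title2 (p : String) : String := String.ofList (titleAux (p.toList.take 2) false)

def DAY_ORDER : List String := ["Mo", "Tu", "We", "Th", "Fr", "Sa", "Su"]

-- ===== PORT A =====
def parse_days (s : Option String) : List String :=
  match s with
  | none => []
  | some str =>
    if str = "" ∨ PySem.Str.lower (PySem.Str.strip str) = "nan"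
        ∨ PySem.Str.lower (PySem.Str.strip str) = "none" then []
    else
      -- str.split(",") has the literal non-empty separator ",", so split? is some
      let parts := (((PySem.Str.split? str ",").getD []).map PySem.Str.strip).filter
        (fun p => p ≠ "")
      let parts2 := parts.map title2
      DAY_ORDER.foldl (fun uniq d => if d ∈ parts2 then uniq ++ [d] else uniq) []

-- ===== PORT B =====
-- idx = {day: i for i, day in enumerate(DAY_ORDER)}
def idxDict : PySem.Dict String Int :=
  (PySem.List.enumerate DAY_ORDER 0).foldl (fun d p => d.insert p.2 p.1) (PySem.Dict.mk [])

-- body of B's loop: tok = p.strip()[:2].title(); if tok in idx: seen.add(idx[tok])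
def addTok (acc : PySem.Set Int) (p : String) : PySem.Set Int :=
  match idxDict.get? (title2 (PySem.Str.strip p)) with
  | some i => PySem.Set.add acc i
  | none => acc

def parse_days_alt (s : Option String) : List String :=
  match s with
  | none => []
  | some str =>
    if str = "" ∨ PySem.Str.lower (PySem.Str.strip str) = "nan"
        ∨ PySem.Str.lower (PySem.Str.strip str) = "none" then []
    else
      let seen := ((PySem.Str.split? str ",").getD []).foldl addTok PySem.Set.empty
      -- DAY_ORDER[i]: every i in seen is a valid index, so .getD "" is never taken
      (PySem.List.sorted seen (fun x => x) false).map
        (fun i => (PySem.List.pyGet? DAY_ORDER i).getD "")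

-- ===== PRECONDITION & SPEC =====
def Spec_parse_days (s : Option String) (out : List String) : Prop := out = parse_days_alt s
instance (s : Option String) (out : List String) : Decidable (Spec_parse_days s out) := by unfold Spec_parse_days; infer_instance

-- ===== CLAIM (what is proved, stated in full; the proofs are below) =====
def Claim_equal_parse_days : Prop := ∀ (s : Option String), Dom_parse_days s → Spec_parse_days s (parse_days s)

-- ===== LEMMAS AND PROOFS =====

def dayIdx : List Int := [0, 1, 2, 3, 4, 5, 6]

theorem idxDict_eq : idxDict =
    PySem.Dict.mk [("Mo",0),("Tu",1),("We",2),("Th",3),("Fr",4),("Sa",5),("Su",6)] := by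
  decide

theorem idx_lookup (t : String) :
    idxDict.get? t =
      if "Mo" = t then some 0 else if "Tu" = t then some 1 else if "We" = t then some 2
      else if "Th" = t then some 3 else if "Fr" = t then some 4 else if "Sa" = t then some 5
      else if "Su" = t then some 6 else none := by
  rw [idxDict_eq]
  simp only [PySem.Dict.get?_mk_cons, beq_iff_eq]
  split_ifs <;> rfl

theorem idx_range (t : String) (i : Int) (h : idxDict.get? t = some i) : i ∈ dayIdx := by
  rw [idx_lookup] at h
  split_ifs at h <;> simp_all [dayIdx]

theorem mem_fold_addTok (l : List String) (acc : PySem.Set Int) (i : Int) :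
    i ∈ l.foldl addTok acc ↔
      i ∈ acc ∨ ∃ p ∈ l, idxDict.get? (title2 (PySem.Str.strip p)) = some i := by
  induction l generalizing acc with
  | nil => simp
  | cons q l ih =>
    simp only [List.foldl_cons]
    rw [ih]
    unfold addTok
    cases h : idxDict.get? (title2 (PySem.Str.strip q)) with
    | none =>
      constructor
      · rintro (hi | ⟨p, hp, hg⟩)
        · exact Or.inl hi
        · exact Or.inr ⟨p, List.mem_cons_of_mem _ hp, hg⟩
      · rintro (hi | ⟨p, hp, hg⟩)
        · exact Or.inl hi
        · rcases List.mem_cons.mp hp with rfl | hp'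
          · rw [h] at hg; cases hg
          · exact Or.inr ⟨p, hp', hg⟩
    | some j =>
      constructor
      · rintro (hij | ⟨p, hp, hg⟩)
        · rcases (PySem.Set.mem_add _ _ _).mp hij with hi | rfl
          · exact Or.inl hi
          · exact Or.inr ⟨q, List.mem_cons_self, h⟩
        · exact Or.inr ⟨p, List.mem_cons_of_mem _ hp, hg⟩
      · rintro (hi | ⟨p, hp, hg⟩)
        · exact Or.inl ((PySem.Set.mem_add _ _ _).mpr (Or.inl hi))
        · rcases List.mem_cons.mp hp with rfl | hp'
          · rw [h] at hg
            injection hg with hji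
            exact Or.inl ((PySem.Set.mem_add _ _ _).mpr (Or.inr hji.symm))
          · exact Or.inr ⟨p, hp', hg⟩

theorem nodup_fold_addTok (l : List String) (acc : PySem.Set Int) (h : acc.Nodup) :
    (l.foldl addTok acc).Nodup := by
  induction l generalizing acc with
  | nil => exact h
  | cons q l ih =>
    simp only [List.foldl_cons]
    apply ih
    unfold addTok
    cases idxDict.get? (title2 (PySem.Str.strip q)) with
    | none => exact h
    | some j => exact PySem.Set.nodup_add _ _ h

-- the 7-way membership equivalence, abstracted over the day and its index
theorem day_mem_equiv (pieces : List String) (i : Int) (d : String)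
    (hd : ∀ t : String, idxDict.get? t = some i ↔ t = d) (hne : d ≠ "") :
    decide (d ∈ ((pieces.map PySem.Str.strip).filter (fun p => p ≠ "")).map title2)
      = decide (i ∈ pieces.foldl addTok PySem.Set.empty) := by
  rw [decide_eq_decide, mem_fold_addTok]
  simp only [List.mem_map, List.mem_filter, decide_eq_true_eq]
  constructor
  · rintro ⟨x, ⟨⟨p0, hp0, rfl⟩, _⟩, htit⟩
    exact Or.inr ⟨p0, hp0, (hd _).mpr htit⟩
  · rintro (h0 | ⟨p0, hp0, hg⟩)
    · cases h0
    · refine ⟨PySem.Str.strip p0, ⟨⟨p0, hp0, rfl⟩, ?_⟩, (hd _).mp hg⟩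
      intro hnil
      apply hne
      rw [← (hd _).mp hg, hnil]
      rfl

-- the index→day characterisation of the map lookup, one instance per day
theorem hd_Mo (t : String) : idxDict.get? t = some 0 ↔ t = "Mo" := by
  rw [idx_lookup]
  split_ifs with h1 h2 h3 h4 h5 h6 h7
  all_goals try (subst_vars; decide)
  exact ⟨fun hF => absurd hF (by simp), fun ht => absurd ht.symm h1⟩

theorem hd_Tu (t : String) : idxDict.get? t = some 1 ↔ t = "Tu" := by
  rw [idx_lookup]
  split_ifs with h1 h2 h3 h4 h5 h6 h7
  all_goals try (subst_vars; decide)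
  exact ⟨fun hF => absurd hF (by simp), fun ht => absurd ht.symm h2⟩

theorem hd_We (t : String) : idxDict.get? t = some 2 ↔ t = "We" := by
  rw [idx_lookup]
  split_ifs with h1 h2 h3 h4 h5 h6 h7
  all_goals try (subst_vars; decide)
  exact ⟨fun hF => absurd hF (by simp), fun ht => absurd ht.symm h3⟩

theorem hd_Th (t : String) : idxDict.get? t = some 3 ↔ t = "Th" := by
  rw [idx_lookup]
  split_ifs with h1 h2 h3 h4 h5 h6 h7
  all_goals try (subst_vars; decide)
  exact ⟨fun hF => absurd hF (by simp), fun ht => absurd ht.symm h4⟩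

theorem hd_Fr (t : String) : idxDict.get? t = some 4 ↔ t = "Fr" := by
  rw [idx_lookup]
  split_ifs with h1 h2 h3 h4 h5 h6 h7
  all_goals try (subst_vars; decide)
  exact ⟨fun hF => absurd hF (by simp), fun ht => absurd ht.symm h5⟩

theorem hd_Sa (t : String) : idxDict.get? t = some 5 ↔ t = "Sa" := by
  rw [idx_lookup]
  split_ifs with h1 h2 h3 h4 h5 h6 h7
  all_goals try (subst_vars; decide)
  exact ⟨fun hF => absurd hF (by simp), fun ht => absurd ht.symm h6⟩

theorem hd_Su (t : String) : idxDict.get? t = some 6 ↔ t = "Su" := by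
  rw [idx_lookup]
  split_ifs with h1 h2 h3 h4 h5 h6 h7
  all_goals try (subst_vars; decide)
  exact ⟨fun hF => absurd hF (by simp), fun ht => absurd ht.symm h7⟩

-- ===== VERDICT (by name: the statement is the Claim_ definition above) =====
theorem parse_days_spec : Claim_equal_parse_days := by
  intro s _
  unfold Spec_parse_days parse_days parse_days_alt
  cases s with
  | none => rfl
  | some str =>
    simp only
    split_ifs with hg
    · rfl
    · set pieces := (PySem.Str.split? str ",").getD [] with hp
      set seen := pieces.foldl addTok PySem.Set.empty with hs
      have hnd : seen.Nodup := nodup_fold_addTok _ _ List.nodup_nil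
      have hperm : (dayIdx.filter (fun i => decide (i ∈ seen))).Perm seen := by
        rw [List.perm_ext_iff_of_nodup (List.Nodup.filter _ (by decide)) hnd]
        intro a
        simp only [List.mem_filter, decide_eq_true_eq, and_iff_right_iff_imp]
        intro ha
        rcases (mem_fold_addTok _ _ _).mp ha with h0 | ⟨p0, _, hg'⟩
        · cases h0
        · exact idx_range _ _ hg'
      have hpair : (dayIdx.filter (fun i => decide (i ∈ seen))).Pairwise
          (fun a b : Int => a < b) :=
        List.Pairwise.sublist List.filter_sublist (by decide)
      rw [PySem.List.sorted_eq_of_perm_of_pairwise_lt _ _ _ hperm hpair]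
      rw [PySem.List.foldl_append_ite_eq_filter]
      rw [show DAY_ORDER = dayIdx.map (fun i => (PySem.List.pyGet? DAY_ORDER i).getD "") from rfl,
        List.filter_map]
      simp only [List.nil_append]
      congr 1
      apply List.filter_congr
      intro i hi
      have hi7 : i = 0 ∨ i = 1 ∨ i = 2 ∨ i = 3 ∨ i = 4 ∨ i = 5 ∨ i = 6 := by
        simpa [dayIdx] using hi
      rcases hi7 with rfl | rfl | rfl | rfl | rfl | rfl | rfl
      · exact day_mem_equiv pieces 0 "Mo" hd_Mo (by decide)
      · exact day_mem_equiv pieces 1 "Tu" hd_Tu (by decide)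
      · exact day_mem_equiv pieces 2 "We" hd_We (by decide)
      · exact day_mem_equiv pieces 3 "Th" hd_Th (by decide)
      · exact day_mem_equiv pieces 4 "Fr" hd_Fr (by decide)
      · exact day_mem_equiv pieces 5 "Sa" hd_Sa (by decide)
      · exact day_mem_equiv pieces 6 "Su" hd_Su (by decide)
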